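-- pv_equiv track=rewrite | github.com/tunggary/Algorithm | 코딩테스트/2022 상반기 LINE/2.py | solution
-- ===== SOURCE A (Python) =====
-- from itertools import combinations
--
-- def solution(sentences, n):
--   require_key_list = []
--
--   # 시간복잡도 O(n*m)
--   for sentence in sentences:
--     #sentence를 구성하는데 필요한 문자 ex) line = ('l','i','n','e') / set()은 집합(중복허용x)으로써 add를 하면 집합내의 중복은 제거된다.
--     require_key = set()
--     #sentence를 구성했을때 점수 ex) 'line IN' = 1+1+1+1+1+2+2 = 9
--     score = 0
--
--     #sentence를 구성하는데 필요한 문자와 점수를 구함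
--     for word in sentence:
--       #빈칸일때는 점수 +1
--       if word == " ":
--         score += 1
--       #대문자일때는 소문자와,"shift"를 집합에 넣어줌, 점수 +2
--       elif word.isupper():
--         require_key.add("shift")
--         require_key.add(word.lower())
--         score += 2
--       #대문자일때는 소문자를 넣어줌, 점수 +1
--       else:
--         require_key.add(word)
--         score += 1
--     #sentence를 구성하는데 필요한 문자와 점수를 저장
--     require_key_list.append((require_key, score))
--
--   answer = 0
--   #시간 복잡도(2^n*n)
--   #require_key_list중에 선택할수 있는 모든 경우의 수를 확인 O(2^n)
--   for i in range(1,len(require_key_list)+1):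
--     for j in combinations(require_key_list,i):
--       union_require_key_list = set()
--       sum_score = 0
--       #경우의 수 들의 필요한 문자들을 합집합을 한 후 원소갯수 구해줌
--       for require_key, score in j:
--         union_require_key_list = union_require_key_list.union(require_key)
--         sum_score += score
--       #원소의 갯수가 n보다 작으면 이전 최댓값과 비교 후 더크면 대입
--       if len(union_require_key_list) <= n:
--         answer = max(answer,sum_score)
--   return answer
-- ===== SOURCE B (Python) =====
-- def solution(sentences, n):
--   # phase 1 identical to the original: per sentence, required-key set and score
--   items = []
--   for sentence in sentences:
--     require_key = set()
--     score = 0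
--     for word in sentence:
--       if word == " ":
--         score += 1
--       elif word.isupper():
--         require_key.add("shift")
--         require_key.add(word.lower())
--         score += 2
--       else:
--         require_key.add(word)
--         score += 1
--     items.append((require_key, score))
--
--   # phase 2: include/exclude DFS over the item list instead of enumerating combinations
--   best = 0
--
--   def dfs(i, union, score):
--     nonlocal best
--     if i == len(items):
--       if len(union) <= n:
--         best = max(best, score)
--       return
--     keys, s = items[i]
--     dfs(i + 1, union, score)          # exclude sentence i
--     dfs(i + 1, union | keys, score + s)  # include sentence i
--
--   dfs(0, set(), 0)
--   return best
-- ===== Notes on version B (the rewrite author's own statement) =====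
-- stated objective: alternative
-- what changed: The size-grouped itertools.combinations enumeration with a fresh union/score fold per subset is replaced by a single include/exclude DFS over the item list that carries the accumulated key-union and running score (the empty selection harmlessly yields the initial 0).
import Mathlib
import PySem

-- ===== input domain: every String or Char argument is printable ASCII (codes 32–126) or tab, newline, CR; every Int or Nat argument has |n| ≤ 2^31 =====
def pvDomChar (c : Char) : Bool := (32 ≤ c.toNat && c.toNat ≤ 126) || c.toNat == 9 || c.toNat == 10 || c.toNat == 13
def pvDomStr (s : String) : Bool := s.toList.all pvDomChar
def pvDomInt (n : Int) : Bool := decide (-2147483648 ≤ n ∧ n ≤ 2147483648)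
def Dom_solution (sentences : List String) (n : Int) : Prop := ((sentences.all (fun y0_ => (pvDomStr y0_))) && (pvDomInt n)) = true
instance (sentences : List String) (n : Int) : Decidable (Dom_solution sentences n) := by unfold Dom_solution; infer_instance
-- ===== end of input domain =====

-- B replaces A's size-grouped combinations enumeration (fresh union/score fold per subset)
-- by one include/exclude DFS carrying the accumulated key-union and running score.

-- ===== PORT A =====
-- phase 1 (identical source text in A and B): required-key set and score of one sentence
def pvItem (sentence : String) : PySem.Set String × Int :=
  sentence.toList.foldl (fun (acc : PySem.Set String × Int) word =>
    if word == ' ' then (acc.1, acc.2 + 1)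
    else if PySem.Chars.isupper word then
      (PySem.Set.add (PySem.Set.add acc.1 "shift") (String.ofList [PySem.Chars.lowerChar word]), acc.2 + 2)
    else (PySem.Set.add acc.1 (String.ofList [word]), acc.2 + 1))
    (PySem.Set.empty, 0)

def pvItems (sentences : List String) : List (PySem.Set String × Int) :=
  sentences.map pvItem

-- itertools.combinations(lst, k): all k-element sub-lists in lexicographic index order
def pvCombos {α : Type} (xs : List α) (k : Nat) : List (List α) :=
  match k, xs with
  | 0, _ => [[]]
  | _ + 1, [] => []
  | k + 1, x :: rest => ((pvCombos rest k).map (x :: ·)) ++ pvCombos rest (k + 1)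

def solution (sentences : List String) (n : Int) : Int :=
  let require_key_list := pvItems sentences
  (List.range' 1 require_key_list.length).foldl (fun answer i =>
    (pvCombos require_key_list i).foldl (fun answer j =>
      let u := j.foldl
        (fun (acc : PySem.Set String × Int) p => (PySem.Set.union acc.1 p.1, acc.2 + p.2))
        (PySem.Set.empty, 0)
      if PySem.Set.len u.1 ≤ n then max answer u.2 else answer) answer) 0

-- ===== PORT B =====
-- include/exclude DFS: exclude item first, then include it (union the keys, add the score);
-- at the end of the list, update the best if the union fits on n keys
def pvDfs (n : Int) : List (PySem.Set String × Int) → PySem.Set String → Int → Int → Int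
  | [], u, score, best => if PySem.Set.len u ≤ n then max best score else best
  | (keys, s) :: rest, u, score, best =>
      pvDfs n rest (PySem.Set.union u keys) (score + s) (pvDfs n rest u score best)

def solution_alt (sentences : List String) (n : Int) : Int :=
  pvDfs n (pvItems sentences) PySem.Set.empty 0 0

-- ===== PRECONDITION & SPEC =====
def Spec_solution (sentences : List String) (n : Int) (out : Int) : Prop := out = solution_alt sentences n
instance (sentences : List String) (n : Int) (out : Int) : Decidable (Spec_solution sentences n out) := by unfold Spec_solution; infer_instance

-- ===== CLAIM (what is proved, stated in full; the proofs are below) =====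
def Claim_equal_solution : Prop := ∀ (sentences : List String) (n : Int), Dom_solution sentences n → Spec_solution sentences n (solution sentences n)

-- ===== LEMMAS AND PROOFS =====

-- union of the key sets of a subset, accumulated from u, in list order
def pvAccU (u : PySem.Set String) (j : List (PySem.Set String × Int)) : PySem.Set String :=
  j.foldl (fun a p => PySem.Set.union a p.1) u

def pvScore (j : List (PySem.Set String × Int)) : Int :=
  j.foldl (fun a p => a + p.2) 0

-- the common update step: both programs do this once per enumerated subset
def pvUpd (n : Int) (u : PySem.Set String) (s : Int) (b : Int)
    (j : List (PySem.Set String × Int)) : Int :=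
  if PySem.Set.len (pvAccU u j) ≤ n then max b (s + pvScore j) else b

theorem pvScore_shift (l : List (PySem.Set String × Int)) :
    ∀ (a : Int), l.foldl (fun a p => a + p.2) a = a + pvScore l := by
  induction l with
  | nil => intro a; simp [pvScore]
  | cons q l ih =>
    intro a
    simp only [pvScore, List.foldl_cons]
    rw [ih (a + q.2), ih (0 + q.2)]
    ring

theorem pvScore_cons (p : PySem.Set String × Int) (j : List (PySem.Set String × Int)) :
    pvScore (p :: j) = p.2 + pvScore j := by
  simp only [pvScore, List.foldl_cons]
  rw [pvScore_shift j (0 + p.2)]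
  simp only [pvScore]
  ring

theorem pvUpd_cons (n : Int) (u : PySem.Set String) (s : Int) (b : Int)
    (p : PySem.Set String × Int) (j : List (PySem.Set String × Int)) :
    pvUpd n u s b (p :: j) = pvUpd n (PySem.Set.union u p.1) (s + p.2) b j := by
  simp only [pvUpd, pvAccU, List.foldl_cons, pvScore_cons]
  ring_nf

-- A's per-combination fold computes exactly (pvAccU ∅ j, pvScore j)
theorem pvEval_eq (j : List (PySem.Set String × Int)) :
    j.foldl (fun (acc : PySem.Set String × Int) p => (PySem.Set.union acc.1 p.1, acc.2 + p.2))
      (PySem.Set.empty, 0) = (pvAccU PySem.Set.empty j, pvScore j) := by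
  have h : ∀ (l : List (PySem.Set String × Int)) (u : PySem.Set String) (s : Int),
      l.foldl (fun (acc : PySem.Set String × Int) p => (PySem.Set.union acc.1 p.1, acc.2 + p.2))
        (u, s) = (pvAccU u l, s + pvScore l) := by
    intro l
    induction l with
    | nil => intro u s; simp [pvAccU, pvScore]
    | cons q l ih =>
      intro u s
      simp only [List.foldl_cons, ih, pvAccU, pvScore_cons, Prod.mk.injEq]
      exact ⟨trivial, by ring⟩
  rw [h]; simp

-- B's DFS is the fold of pvUpd over List.sublists' of the remaining items
theorem pvDfs_eq (n : Int) (items : List (PySem.Set String × Int)) :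
    ∀ (u : PySem.Set String) (s b : Int),
      pvDfs n items u s b = (List.sublists' items).foldl (pvUpd n u s) b := by
  induction items with
  | nil => intro u s b; simp [pvDfs, pvUpd, pvAccU, pvScore, List.sublists'_nil]
  | cons p rest ih =>
    intro u s b
    obtain ⟨keys, sc⟩ := p
    simp only [pvDfs, List.sublists'_cons, List.foldl_append, List.foldl_map, ih]
    congr 1
    funext b' j
    rw [pvUpd_cons]

-- nested loops = one fold over the flatMap
theorem pvFoldl_flatMap {α β γ : Type} (f : γ → β → γ) (g : α → List β) :
    ∀ (l : List α) (c : γ), (l.flatMap g).foldl f c = l.foldl (fun c a => (g a).foldl f c) c := by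
  intro l
  induction l with
  | nil => intro c; simp
  | cons a l ih => intro c; simp [List.flatMap_cons, List.foldl_append, ih]

-- pvCombos is a permutation of Mathlib's sublistsLen
theorem pvCombos_perm {α : Type} (xs : List α) :
    ∀ k, List.Perm (pvCombos xs k) (List.sublistsLen k xs) := by
  induction xs with
  | nil => intro k; cases k <;> simp [pvCombos]
  | cons x rest ih =>
    intro k
    cases k with
    | zero => simp [pvCombos]
    | succ k =>
      simp only [pvCombos, List.sublistsLen_succ_cons]
      exact (((ih k).map _).append (ih (k + 1))).trans (List.perm_append_comm)

theorem pvFlatMap_perm {α β : Type} (f g : α → List β) (l : List α)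
    (h : ∀ a ∈ l, List.Perm (f a) (g a)) : List.Perm (l.flatMap f) (l.flatMap g) := by
  induction l with
  | nil => simp
  | cons a l ih =>
    simp only [List.flatMap_cons]
    exact (h a (by simp)).append (ih fun a ha => h a (by simp [ha]))

-- pvUpd is right-commutative in its subset argument
theorem pvUpd_rcomm (n : Int) (u : PySem.Set String) (s : Int) (b : Int)
    (j₁ j₂ : List (PySem.Set String × Int)) :
    pvUpd n u s (pvUpd n u s b j₁) j₂ = pvUpd n u s (pvUpd n u s b j₂) j₁ := by
  simp only [pvUpd]
  split_ifs <;> simp [max_assoc, max_comm (s + pvScore j₁)]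

-- all subsets in A's order (plus the empty one in front) is a permutation of sublists'
theorem pvEnum_perm (items : List (PySem.Set String × Int)) :
    List.Perm ([] :: (List.range' 1 items.length).flatMap (pvCombos items))
      (List.sublists' items) := by
  have h0 : ([] :: (List.range' 1 items.length).flatMap (pvCombos items)) =
      (List.range (items.length + 1)).flatMap (pvCombos items) := by
    rw [List.range_eq_range', List.range'_succ, List.flatMap_cons]
    simp [pvCombos]
  rw [h0]
  exact (pvFlatMap_perm _ _ _ (fun k _ => pvCombos_perm items k)).trans
    (List.range_bind_sublistsLen_perm items)

-- ===== VERDICT (by name: the statement is the Claim_ definition above) =====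
theorem solution_spec : Claim_equal_solution := by
  intro sentences n _
  show solution sentences n = solution_alt sentences n
  unfold solution solution_alt
  set items := pvItems sentences with hitems
  rw [pvDfs_eq]
  have hA : (List.range' 1 items.length).foldl (fun answer i =>
      (pvCombos items i).foldl (fun answer j =>
        let u := j.foldl
          (fun (acc : PySem.Set String × Int) p => (PySem.Set.union acc.1 p.1, acc.2 + p.2))
          (PySem.Set.empty, 0)
        if PySem.Set.len u.1 ≤ n then max answer u.2 else answer) answer) 0 =
      ((List.range' 1 items.length).flatMap (pvCombos items)).foldl
        (pvUpd n PySem.Set.empty 0) 0 := by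
    rw [pvFoldl_flatMap]
    congr 1
    funext c i
    congr 1
    funext b j
    simp only [pvEval_eq, pvUpd]
    norm_num
  rw [hA]
  have hperm := (pvEnum_perm items).foldl_eq'
    (fun x _ y _ z => pvUpd_rcomm n PySem.Set.empty 0 z x y) 0
  rw [← hperm]
  simp only [List.foldl_cons]
  congr 1
  simp [pvUpd, pvAccU, pvScore]
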